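-- pv_equiv track=rewrite | github.com/kuxall/budgetly_lga | backend/services/image_validation_service.py | _mime_types_compatible
-- ===== SOURCE A (Python) =====
-- def _mime_types_compatible(detected: str, expected: str) -> bool:
--     """Check if detected and expected MIME types are compatible"""
--
--     # Handle common variations
--     compatible_pairs = [
--         ('image/jpeg', 'image/jpg'),
--         ('image/tiff', 'image/tif'),
--         ('application/pdf', 'application/x-pdf')
--     ]
--
--     if detected == expected:
--         return True
--
--     for pair in compatible_pairs:
--         if (detected, expected) in [pair, pair[::-1]]:
--             return True
--
--     return False
-- ===== SOURCE B (Python) =====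
-- _MIME_ALIASES = {
--     'image/jpg': 'image/jpeg',
--     'image/tif': 'image/tiff',
--     'application/x-pdf': 'application/pdf',
-- }
--
--
-- def _mime_types_compatible(detected: str, expected: str) -> bool:
--     """Check if detected and expected MIME types are compatible"""
--     return _MIME_ALIASES.get(detected, detected) == _MIME_ALIASES.get(expected, expected)
-- ===== Notes on version B (the rewrite author's own statement) =====
-- stated objective: simpler
-- what changed: Replaces the pair-enumeration loop with reversed-tuple membership tests by an alias-normalization dict: both MIME types are canonicalized via aliases.get(x, x) and compared once for equality.
import Mathlib
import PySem

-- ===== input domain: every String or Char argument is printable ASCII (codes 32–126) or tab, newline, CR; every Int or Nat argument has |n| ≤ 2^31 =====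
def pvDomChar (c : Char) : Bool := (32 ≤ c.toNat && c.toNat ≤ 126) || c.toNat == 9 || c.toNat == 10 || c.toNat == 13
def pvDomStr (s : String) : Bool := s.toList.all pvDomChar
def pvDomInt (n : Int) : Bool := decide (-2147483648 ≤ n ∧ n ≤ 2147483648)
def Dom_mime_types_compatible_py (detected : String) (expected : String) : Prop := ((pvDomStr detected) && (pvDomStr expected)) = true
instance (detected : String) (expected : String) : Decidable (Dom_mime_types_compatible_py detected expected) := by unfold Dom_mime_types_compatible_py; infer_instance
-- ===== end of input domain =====

-- B replaces A's pair-enumeration loop with a canonicalize-then-compare decomposition (alias dict); objective: simpler.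

-- ===== PORT A =====
def pvCompatiblePairs : List (String × String) :=
  [("image/jpeg", "image/jpg"), ("image/tiff", "image/tif"), ("application/pdf", "application/x-pdf")]

-- 'for pair: if (detected, expected) in [pair, pair[::-1]]: return True' ported as List.any
def mime_types_compatible_py (detected : String) (expected : String) : Bool :=
  if detected == expected then true
  else if pvCompatiblePairs.any (fun pair =>
      (detected, expected) == pair || (detected, expected) == (pair.2, pair.1)) then true
  else false

-- ===== PORT B =====
def pvMimeAliases : PySem.Dict String String :=
  PySem.Dict.ofList
    [("image/jpg", "image/jpeg"), ("image/tif", "image/tiff"), ("application/x-pdf", "application/pdf")]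

def mime_types_compatible_py_alt (detected : String) (expected : String) : Bool :=
  pvMimeAliases.getD detected detected == pvMimeAliases.getD expected expected

-- ===== PRECONDITION & SPEC =====
def Spec_mime_types_compatible_py (detected : String) (expected : String) (out : Bool) : Prop := out = mime_types_compatible_py_alt detected expected
instance (detected : String) (expected : String) (out : Bool) : Decidable (Spec_mime_types_compatible_py detected expected out) := by unfold Spec_mime_types_compatible_py; infer_instance

-- ===== CLAIM (what is proved, stated in full; the proofs are below) =====
def Claim_equal_mime_types_compatible_py : Prop := ∀ (detected : String) (expected : String), Dom_mime_types_compatible_py detected expected → Spec_mime_types_compatible_py detected expected (mime_types_compatible_py detected expected)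

-- ===== LEMMAS AND PROOFS =====

theorem getD_alias (s : String) : pvMimeAliases.getD s s =
    if s = "image/jpg" then "image/jpeg"
    else if s = "image/tif" then "image/tiff"
    else if s = "application/x-pdf" then "application/pdf" else s := by
  simp [pvMimeAliases, PySem.Dict.ofList, PySem.Dict.update, List.foldl,
    PySem.Dict.getD_insert, PySem.Dict.getD_empty]
  split_ifs <;> simp_all

theorem mime_eq_alt (detected expected : String) :
    mime_types_compatible_py detected expected = mime_types_compatible_py_alt detected expected := by
  simp only [mime_types_compatible_py, mime_types_compatible_py_alt, pvCompatiblePairs,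
    getD_alias, List.any_cons, List.any_nil]
  split_ifs <;> simp_all <;> exact fun h => ‹¬_ = _› h.symm

-- ===== VERDICT (by name: the statement is the Claim_ definition above) =====
theorem mime_types_compatible_py_spec : Claim_equal_mime_types_compatible_py := by
  intro d e _
  unfold Spec_mime_types_compatible_py
  exact mime_eq_alt d e
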